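-- pv_equiv track=rewrite | github.com/paoladiazzh/Analizador-L-xico-y-Sint-ctico-Simplificado | AnalizadorLexico_SintaticoSimplificado.py | afd_id
-- ===== SOURCE A (Python) =====
-- def afd_id(cadena):
--     estado = 0
--     i = 0
--     while i < len(cadena):
--         c = cadena[i]
--         if estado == 0:
--             if c.isalpha():
--                 estado = 1
--             else:
--                 break
--         elif estado == 1:
--             if c.isalnum():
--                 estado = 1
--             else:
--                 break
--         i += 1
--     if estado == 1:
--         return i  # longitud del token válido
--     return 0
-- ===== SOURCE B (Python) =====
-- def _alnum_run(s):
--     # length of the maximal leading run of alphanumeric characters of s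
--     for j, c in enumerate(s):
--         if not c.isalnum():
--             return j
--     return len(s)
--
-- def afd_id(cadena):
--     if not cadena or not cadena[0].isalpha():
--         return 0
--     return 1 + _alnum_run(cadena[1:])
-- ===== Notes on version B (the rewrite author's own statement) =====
-- stated objective: simpler
-- what changed: Replaces the explicit two-state DFA with state variable by an early-return guard on the first character plus a direct count of the leading alphanumeric run; no estado variable or state dispatch remains.
import Mathlib
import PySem

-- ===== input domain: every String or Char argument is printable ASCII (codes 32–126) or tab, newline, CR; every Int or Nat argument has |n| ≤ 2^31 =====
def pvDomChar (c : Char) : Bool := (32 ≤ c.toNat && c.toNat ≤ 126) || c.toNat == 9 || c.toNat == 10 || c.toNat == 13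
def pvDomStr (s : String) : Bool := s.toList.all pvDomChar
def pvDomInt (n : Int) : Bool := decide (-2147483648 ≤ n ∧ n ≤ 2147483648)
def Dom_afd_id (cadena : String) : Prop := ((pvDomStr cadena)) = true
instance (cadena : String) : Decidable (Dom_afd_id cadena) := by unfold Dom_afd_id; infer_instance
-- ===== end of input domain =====

-- B replaces A's explicit two-state DFA by a first-character guard plus a direct count of the
-- leading alphanumeric run (objective: simpler).

-- ===== PORT A =====
-- the while loop: state = (estado, i); recursion on the unread suffix of the string
def afdLoop : List Char → Nat → Nat → Nat × Nat
  | [], estado, i => (estado, i)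
  | c :: rest, estado, i =>
    if estado = 0 then
      if PySem.Chars.isalpha c then afdLoop rest 1 (i + 1) else (estado, i)
    else if estado = 1 then
      if PySem.Chars.isalnum c then afdLoop rest 1 (i + 1) else (estado, i)
    else afdLoop rest estado (i + 1)

def afd_id (cadena : String) : Int :=
  let r := afdLoop cadena.toList 0 0
  if r.1 = 1 then (r.2 : Int) else 0

-- ===== PORT B =====
-- _alnum_run: the for loop returning j at the first non-alphanumeric character
def alnumRun : List Char → Nat
  | [] => 0
  | c :: rest => if PySem.Chars.isalnum c then 1 + alnumRun rest else 0

def afd_id_alt (cadena : String) : Int :=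
  match cadena.toList with
  | [] => 0
  | c :: rest => if PySem.Chars.isalpha c then 1 + (alnumRun rest : Int) else 0

-- ===== PRECONDITION & SPEC =====
def Spec_afd_id (cadena : String) (out : Int) : Prop := out = afd_id_alt cadena
instance (cadena : String) (out : Int) : Decidable (Spec_afd_id cadena out) := by unfold Spec_afd_id; infer_instance

-- ===== CLAIM (what is proved, stated in full; the proofs are below) =====
def Claim_equal_afd_id : Prop := ∀ (cadena : String), Dom_afd_id cadena → Spec_afd_id cadena (afd_id cadena)

-- ===== LEMMAS AND PROOFS =====
-- in state 1 the DFA consumes exactly the leading alphanumeric run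
theorem afdLoop_one (cs : List Char) : ∀ i, afdLoop cs 1 i = (1, i + alnumRun cs) := by
  induction cs with
  | nil => intro i; simp [afdLoop, alnumRun]
  | cons c rest ih =>
    intro i
    by_cases h : PySem.Chars.isalnum c = true
    · simp [afdLoop, alnumRun, h, ih (i + 1)]; omega
    · simp [afdLoop, alnumRun, h]

-- ===== VERDICT (by name: the statement is the Claim_ definition above) =====
theorem afd_id_spec : Claim_equal_afd_id := by
  intro cadena _
  unfold Spec_afd_id afd_id afd_id_alt
  match h : cadena.toList with
  | [] => simp [afdLoop]
  | c :: rest =>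
    by_cases ha : PySem.Chars.isalpha c = true
    · simp [afdLoop, ha, afdLoop_one]
    · simp [afdLoop, ha]
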